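-- pv_equiv track=rewrite | github.com/dtmhdev89/aio-100-days-pythons | day-4/practice.py | compute_slicing_kernel_indices
-- ===== SOURCE A (Python) =====
-- def compute_slicing_kernel_indices(H, K):
--     vector = list()
--
--     for i in range(H):
--         j = i + 1
--
--         while j < H:
--             distance = j - i + 1
--             if distance == K: vector.append(tuple([i, j]))
--
--             j += 1
--
--     return vector
-- ===== SOURCE B (Python) =====
-- def compute_slicing_kernel_indices(H, K):
--     if K < 2:
--         return []
--     return [(i, i + K - 1) for i in range(H - K + 1)]
-- ===== Notes on version B (the rewrite author's own statement) =====
-- stated objective: faster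
-- what changed: A scans every pair (i, j) with two nested loops and tests the distance; B computes the single partner j = i + K - 1 in closed form and emits one pass over i in range(H-K+1) (empty when K < 2).
import Mathlib
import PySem

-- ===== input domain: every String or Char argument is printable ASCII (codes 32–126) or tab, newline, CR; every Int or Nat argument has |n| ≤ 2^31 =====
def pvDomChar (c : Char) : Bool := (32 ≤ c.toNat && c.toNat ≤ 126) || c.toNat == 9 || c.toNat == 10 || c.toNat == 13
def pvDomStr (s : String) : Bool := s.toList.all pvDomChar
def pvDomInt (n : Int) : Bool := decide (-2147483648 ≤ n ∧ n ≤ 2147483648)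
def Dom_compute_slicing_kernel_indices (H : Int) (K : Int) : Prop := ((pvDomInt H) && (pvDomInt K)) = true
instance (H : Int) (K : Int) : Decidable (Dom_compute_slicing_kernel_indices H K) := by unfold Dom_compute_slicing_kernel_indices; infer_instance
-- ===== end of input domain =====

-- B replaces A's quadratic double scan by the closed form j = i + K - 1 in one pass; faster (asymptotic).

-- ===== PORT A =====
-- literal port: for i in range(H): j = i+1; while j < H: if j - i + 1 == K: append (i, j); j += 1
def compute_slicing_kernel_indices (H : Int) (K : Int) : List (Int × Int) :=
  (PySem.List.pyRange 0 H 1).foldl (fun vector i =>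
    (PySem.List.pyRange (i + 1) H 1).foldl (fun vector j =>
      if j - i + 1 == K then vector ++ [(i, j)] else vector) vector) []

-- ===== PORT B =====
-- literal port of Source B: if K < 2: return []; return [(i, i+K-1) for i in range(H-K+1)]
def compute_slicing_kernel_indices_alt (H : Int) (K : Int) : List (Int × Int) :=
  if K < 2 then []
  else (PySem.List.pyRange 0 (H - K + 1) 1).map (fun i => (i, i + K - 1))

-- ===== PRECONDITION & SPEC =====
def Spec_compute_slicing_kernel_indices (H : Int) (K : Int) (out : List (Int × Int)) : Prop := out = compute_slicing_kernel_indices_alt H K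
instance (H : Int) (K : Int) (out : List (Int × Int)) : Decidable (Spec_compute_slicing_kernel_indices H K out) := by unfold Spec_compute_slicing_kernel_indices; infer_instance

-- ===== CLAIM (what is proved, stated in full; the proofs are below) =====
def Claim_equal_compute_slicing_kernel_indices : Prop := ∀ (H : Int) (K : Int), Dom_compute_slicing_kernel_indices H K → Spec_compute_slicing_kernel_indices H K (compute_slicing_kernel_indices H K)

-- ===== LEMMAS AND PROOFS =====

-- filtering a unit-step range for a single value yields that value or nothing
lemma pv_filter_pyRange_eq_single (c a b : Int) :
    (PySem.List.pyRange a b 1).filter (fun j => j == c) =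
      if a ≤ c ∧ c < b then [c] else [] := by
  split_ifs with h
  · rw [PySem.List.pyRange_one_append a c b (by omega) (by omega),
      PySem.List.pyRange_one_cons (by omega : c < b), List.filter_append]
    have h1 : (PySem.List.pyRange a c 1).filter (fun j => j == c) = [] := by
      rw [List.filter_eq_nil_iff]
      intro j hj
      have := (PySem.List.mem_pyRange_one).1 hj
      simp only [beq_iff_eq]; omega
    have h2 : (PySem.List.pyRange (c + 1) b 1).filter (fun j => j == c) = [] := by
      rw [List.filter_eq_nil_iff]
      intro j hj
      have := (PySem.List.mem_pyRange_one).1 hj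
      simp only [beq_iff_eq]; omega
    simp [h1, h2]
  · rw [List.filter_eq_nil_iff]
    intro j hj
    have := (PySem.List.mem_pyRange_one).1 hj
    simp only [beq_iff_eq]; omega

-- A's nested loops reduce to a flatMap of per-i singletons
lemma pv_A_flatMap (H K : Int) :
    compute_slicing_kernel_indices H K =
      (PySem.List.pyRange 0 H 1).flatMap (fun i =>
        if i + 1 ≤ i + K - 1 ∧ i + K - 1 < H then [(i, i + K - 1)] else []) := by
  unfold compute_slicing_kernel_indices
  simp only [PySem.List.foldl_append_if]
  rw [PySem.List.foldl_append_eq_flatMap, List.nil_append]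
  congr 1
  funext i
  have hp : (fun j => j - i + 1 == K) = (fun j => j == i + K - 1) := by
    funext j
    by_cases h : j = i + K - 1
    · subst h; simp; omega
    · simp [h]; omega
  rw [hp, pv_filter_pyRange_eq_single]
  split_ifs <;> simp

-- ===== VERDICT (by name: the statement is the Claim_ definition above) =====
theorem compute_slicing_kernel_indices_spec : Claim_equal_compute_slicing_kernel_indices := by
  intro H K _
  unfold Spec_compute_slicing_kernel_indices compute_slicing_kernel_indices_alt
  rw [pv_A_flatMap]
  by_cases hK : K < 2
  · rw [if_pos hK, List.flatMap_eq_nil_iff.2]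
    intro i _
    rw [if_neg]; omega
  · rw [if_neg hK]
    by_cases hm : H - K + 1 ≤ 0
    · rw [show PySem.List.pyRange 0 (H - K + 1) 1 = [] from
        PySem.List.pyRange_one_eq_nil (by omega), List.map_nil,
        List.flatMap_eq_nil_iff.2]
      intro i hi
      have := (PySem.List.mem_pyRange_one).1 hi
      rw [if_neg]; omega
    · rw [PySem.List.pyRange_one_append 0 (H - K + 1) H (by omega) (by omega),
        List.flatMap_append]
      have h2 : (PySem.List.pyRange (H - K + 1) H 1).flatMap (fun i =>
          if i + 1 ≤ i + K - 1 ∧ i + K - 1 < H then [(i, i + K - 1)] else []) = [] := by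
        rw [List.flatMap_eq_nil_iff]
        intro i hi
        have := (PySem.List.mem_pyRange_one).1 hi
        rw [if_neg]; omega
      rw [h2, List.append_nil]
      rw [List.map_eq_flatMap]
      apply List.flatMap_congr
      intro x hx
      have := (PySem.List.mem_pyRange_one).1 hx
      rw [if_pos (by omega)]
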